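-- pv_equiv track=rewrite | github.com/Amnesia06/Generate_rows | test3.py | determine_optimal_start_lane
-- ===== SOURCE A (Python) =====
-- def determine_optimal_start_lane(n_inner_x_sweeps, max_lane_idx_x, exit_point_lanes, is_corner_exit):
--     """
--     Determines the optimal starting lane based on exit location for fastest completion.
--     """
--     if n_inner_x_sweeps <= 0:
--         return 0 if exit_point_lanes[0] <= max_lane_idx_x / 2.0 else max_lane_idx_x
--
--     first_inner_lane_x = 1
--     last_inner_lane_x = max_lane_idx_x - 1
--     ex_ln_x = exit_point_lanes[0]
--
--     if is_corner_exit: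
--         # For corner exits, start from the side that leads to shorter headland path
--         return first_inner_lane_x if ex_ln_x <= max_lane_idx_x / 2.0 else last_inner_lane_x
--     else:
--         # For custom exits, calculate optimal start based on total path distance
--         min_total_distance = float('inf')
--         optimal_start = first_inner_lane_x
--
--         for potential_start in range(first_inner_lane_x, last_inner_lane_x + 1):
--             # Estimate total distance for this starting position
--             inner_sweep_distance = n_inner_x_sweeps * (max_lane_idx_x + 1)  # Rough estimate
--             headland_distance = 2 * (max_lane_idx_x + max_lane_idx_x + 1)  # Perimeter
--             exit_approach_distance = abs(potential_start - ex_ln_x)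
--
--             total_estimated_distance = inner_sweep_distance + headland_distance + exit_approach_distance
--
--             if total_estimated_distance < min_total_distance:
--                 min_total_distance = total_estimated_distance
--                 optimal_start = potential_start
--
--         return optimal_start
-- ===== SOURCE B (Python) =====
-- def determine_optimal_start_lane(n_inner_x_sweeps, max_lane_idx_x, exit_point_lanes, is_corner_exit):
--     e = exit_point_lanes[0]
--     m = max_lane_idx_x
--     if n_inner_x_sweeps <= 0:
--         return 0 if 2 * e <= m else m
--     if is_corner_exit:
--         return 1 if 2 * e <= m else m - 1
--     # the loop in A minimizes |start - e| over 1..m-1 (first minimizer): closed-form clamp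
--     return max(1, min(e, m - 1))
-- ===== Notes on version B (the rewrite author's own statement) =====
-- stated objective: simpler
-- what changed: The scan over all candidate start lanes (whose estimated distance differs only in |start - exit_lane|) is replaced by the closed-form clamp max(1, min(exit_lane, max_lane_idx_x - 1)); the half-field comparison e <= m/2.0 becomes the exact integer test 2*e <= m.
import Mathlib
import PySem

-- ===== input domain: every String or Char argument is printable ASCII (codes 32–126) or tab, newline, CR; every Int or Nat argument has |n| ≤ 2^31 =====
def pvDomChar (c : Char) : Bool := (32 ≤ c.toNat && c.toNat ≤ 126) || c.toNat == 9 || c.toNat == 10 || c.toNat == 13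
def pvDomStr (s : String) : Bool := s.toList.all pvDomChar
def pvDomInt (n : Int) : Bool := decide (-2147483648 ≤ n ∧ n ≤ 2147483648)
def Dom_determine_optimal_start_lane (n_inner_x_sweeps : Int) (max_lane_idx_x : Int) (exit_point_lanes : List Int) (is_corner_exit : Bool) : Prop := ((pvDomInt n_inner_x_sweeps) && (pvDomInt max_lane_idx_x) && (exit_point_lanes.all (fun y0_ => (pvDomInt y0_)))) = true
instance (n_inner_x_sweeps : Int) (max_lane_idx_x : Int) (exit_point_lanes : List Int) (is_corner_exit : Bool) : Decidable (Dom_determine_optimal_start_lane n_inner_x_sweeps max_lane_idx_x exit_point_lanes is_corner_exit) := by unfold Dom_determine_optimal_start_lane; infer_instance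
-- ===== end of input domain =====

-- B replaces A's linear scan over candidate start lanes by the closed-form clamp
-- max 1 (min e (m-1)); objective: simpler (a closed form instead of the loop).

-- ===== PORT A =====
-- loop body of A's for-loop: state = (min_total_distance : Option Int (none = float('inf')), optimal_start)
def pvStepA (C e : Int) (s : Option Int × Int) (p : Int) : Option Int × Int :=
  let total := C + |p - e|                -- inner_sweep + headland (constant C) + |p - e|
  match s.1 with
  | none => (some total, p)               -- anything < inf
  | some mtd => if total < mtd then (some total, p) else s

-- 'exit_point_lanes[0]' raises IndexError on []; excluded by Pre_, getD 0 is arbitrary there.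
-- 'e <= m/2.0' is ported as the exact integer test 2*e ≤ m (m/2.0 is exact for |m| ≤ 2^31).
def determine_optimal_start_lane (n_inner_x_sweeps : Int) (max_lane_idx_x : Int) (exit_point_lanes : List Int) (is_corner_exit : Bool) : Int :=
  let e := (PySem.List.pyGet? exit_point_lanes 0).getD 0
  if n_inner_x_sweeps ≤ 0 then
    (if 2 * e ≤ max_lane_idx_x then 0 else max_lane_idx_x)
  else
    let first : Int := 1
    let last : Int := max_lane_idx_x - 1
    if is_corner_exit then
      (if 2 * e ≤ max_lane_idx_x then first else last)
    else
      ((PySem.List.pyRange first (last + 1) 1).foldl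
        (pvStepA (n_inner_x_sweeps * (max_lane_idx_x + 1) + 2 * (max_lane_idx_x + max_lane_idx_x + 1)) e)
        (none, first)).2

-- ===== PORT B =====
def determine_optimal_start_lane_alt (n_inner_x_sweeps : Int) (max_lane_idx_x : Int) (exit_point_lanes : List Int) (is_corner_exit : Bool) : Int :=
  let e := (PySem.List.pyGet? exit_point_lanes 0).getD 0
  let m := max_lane_idx_x
  if n_inner_x_sweeps ≤ 0 then (if 2 * e ≤ m then 0 else m)
  else if is_corner_exit then (if 2 * e ≤ m then 1 else m - 1)
  else max 1 (min e (m - 1))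

-- ===== PRECONDITION & SPEC =====
-- A evaluates exit_point_lanes[0] on every path: it raises IndexError on the empty list.
def Pre_determine_optimal_start_lane (n_inner_x_sweeps : Int) (max_lane_idx_x : Int) (exit_point_lanes : List Int) (is_corner_exit : Bool) : Prop :=
  exit_point_lanes ≠ []
instance (n_inner_x_sweeps : Int) (max_lane_idx_x : Int) (exit_point_lanes : List Int) (is_corner_exit : Bool) : Decidable (Pre_determine_optimal_start_lane n_inner_x_sweeps max_lane_idx_x exit_point_lanes is_corner_exit) := by unfold Pre_determine_optimal_start_lane; infer_instance

def pvWitness_determine_optimal_start_lane : Int × Int × List Int × Bool := (1, 3, [2], false)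

def Spec_determine_optimal_start_lane (n_inner_x_sweeps : Int) (max_lane_idx_x : Int) (exit_point_lanes : List Int) (is_corner_exit : Bool) (out : Int) : Prop := out = determine_optimal_start_lane_alt n_inner_x_sweeps max_lane_idx_x exit_point_lanes is_corner_exit
instance (n_inner_x_sweeps : Int) (max_lane_idx_x : Int) (exit_point_lanes : List Int) (is_corner_exit : Bool) (out : Int) : Decidable (Spec_determine_optimal_start_lane n_inner_x_sweeps max_lane_idx_x exit_point_lanes is_corner_exit out) := by unfold Spec_determine_optimal_start_lane; infer_instance

-- ===== CLAIM (what is proved, stated in full; the proofs are below) =====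
def Claim_equal_determine_optimal_start_lane : Prop := ∀ (n_inner_x_sweeps : Int) (max_lane_idx_x : Int) (exit_point_lanes : List Int) (is_corner_exit : Bool), Dom_determine_optimal_start_lane n_inner_x_sweeps max_lane_idx_x exit_point_lanes is_corner_exit → Pre_determine_optimal_start_lane n_inner_x_sweeps max_lane_idx_x exit_point_lanes is_corner_exit → Spec_determine_optimal_start_lane n_inner_x_sweeps max_lane_idx_x exit_point_lanes is_corner_exit (determine_optimal_start_lane n_inner_x_sweeps max_lane_idx_x exit_point_lanes is_corner_exit)

-- ===== LEMMAS AND PROOFS =====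

-- Once the current best lane q satisfies e ≤ q, no later lane p > q can strictly improve (|p-e| > |q-e|).
theorem pvLoop_noupd (C e q : Int) (he : e ≤ q) :
    ∀ (k : Nat) (a b : Int), q < a → (b - a).toNat = k →
      (PySem.List.pyRange a b 1).foldl (pvStepA C e) (some (C + (q - e)), q)
        = (some (C + (q - e)), q) := by
  intro k
  induction k with
  | zero =>
    intro a b ha hk
    rw [PySem.List.pyRange_one_eq_nil (by omega)]
    rfl
  | succ k ih =>
    intro a b ha hk
    have hab : a < b := by omega
    rw [PySem.List.pyRange_one_cons hab, List.foldl_cons]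
    have habs : |a - e| = a - e := abs_of_nonneg (by omega)
    have hstep : pvStepA C e (some (C + (q - e)), q) a = (some (C + (q - e)), q) := by
      simp only [pvStepA, habs]
      rw [if_neg (by omega)]
    rw [hstep]
    exact ih (a + 1) b (by omega) (by omega)

-- While q ≤ e, the loop keeps advancing the best lane toward e and ends at clamp q e (b-1).
theorem pvLoop_approach (C e : Int) :
    ∀ (k : Nat) (q b : Int), q ≤ e → (b - (q + 1)).toNat = k →
      ((PySem.List.pyRange (q + 1) b 1).foldl (pvStepA C e) (some (C + (e - q)), q)).2
        = max q (min e (b - 1)) := by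
  intro k
  induction k with
  | zero =>
    intro q b hq hk
    rw [PySem.List.pyRange_one_eq_nil (by omega)]
    simp only [List.foldl_nil]
    omega
  | succ k ih =>
    intro q b hq hk
    have hab : q + 1 < b := by omega
    rw [PySem.List.pyRange_one_cons hab, List.foldl_cons]
    by_cases hqe : q < e
    · -- q + 1 ≤ e : strict improvement, best lane advances to q+1
      have habs : |q + 1 - e| = e - (q + 1) := by rw [abs_of_nonpos (by omega)]; ring
      have hstep : pvStepA C e (some (C + (e - q)), q) (q + 1)
          = (some (C + (e - (q + 1))), q + 1) := by
        simp only [pvStepA, habs]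
        rw [if_pos (by omega)]
      rw [hstep]
      have := ih (q + 1) b (by omega) (by omega)
      rw [this]
      omega
    · -- q = e : |q+1-e| = 1 is not < 0, no update now, and never again (pvLoop_noupd)
      have hqe' : q = e := by omega
      have habs : |q + 1 - e| = (e - q) + 1 := by rw [abs_of_nonneg (by omega)]; omega
      have hstep : pvStepA C e (some (C + (e - q)), q) (q + 1) = (some (C + (e - q)), q) := by
        simp only [pvStepA, habs]
        rw [if_neg (by omega)]
      rw [hstep]
      have heq : C + (e - q) = C + (q - e) := by omega
      rw [heq, show q + 1 + 1 = q + 2 from by ring, pvLoop_noupd C e q (by omega) (b - (q + 2)).toNat (q + 2) b (by omega) rfl]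
      simp only
      omega

-- ===== VERDICT (by name: the statement is the Claim_ definition above) =====
theorem determine_optimal_start_lane_spec : Claim_equal_determine_optimal_start_lane := by
  intro n m lanes corner _hdom _hpre
  unfold Spec_determine_optimal_start_lane determine_optimal_start_lane determine_optimal_start_lane_alt
  set e := (PySem.List.pyGet? lanes 0).getD 0 with he
  by_cases hn : n ≤ 0
  · simp [hn]
  · simp only [if_neg hn]
    cases corner with
    | true => simp
    | false =>
      simp only [Bool.false_eq_true, if_false]
      set C := n * (m + 1) + 2 * (m + m + 1) with hC
      by_cases hm : m ≤ 1
      · -- empty range: loop never runs, A returns first = 1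
        rw [PySem.List.pyRange_one_eq_nil (by omega)]
        simp only [List.foldl_nil]
        omega
      · rw [PySem.List.pyRange_one_cons (by omega : (1:Int) < m - 1 + 1), List.foldl_cons]
        have hstep : pvStepA C e (none, 1) 1 = (some (C + |1 - e|), 1) := by
          simp [pvStepA]
        rw [hstep]
        by_cases heb : 1 ≤ e
        · have habs : |1 - e| = e - 1 := by rw [abs_of_nonpos (by omega)]; ring
          rw [habs]
          have := pvLoop_approach C e (m - 1 + 1 - (1 + 1)).toNat 1 (m - 1 + 1) heb rfl
          rw [show (1:Int) + 1 = 2 by norm_num] at this ⊢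
          rw [this]
          omega
        · have habs : |1 - e| = 1 - e := abs_of_nonneg (by omega)
          rw [habs, show (1:Int) + 1 = 2 from by norm_num]
          rw [pvLoop_noupd C e 1 (by omega) (m - 1 + 1 - 2).toNat 2 (m - 1 + 1) (by omega) rfl]
          simp only
          omega
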